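-- pv_equiv track=rewrite | github.com/chimenkamp/Logic-Accelerated-DPN-Discovery | dpn_discovery/regions.py | _find_violating_event
-- ===== SOURCE A (Python) =====
-- from typing import Optional
--
-- def _enter(
--     event: str,
--     region: frozenset[str],
--     ts_transitions: set[tuple[str, str, str]],
-- ) -> bool:
--     """Def 2.1 -- enter(e, S'):  exists(s,e,s')  in  T : s  not in  S'  and  s'  in  S'."""
--     for src, evt, tgt in ts_transitions:
--         if evt == event and src not in region and tgt in region:
--             return True
--     return False
--
-- def _exit(
--     event: str,
--     region: frozenset[str],
--     ts_transitions: set[tuple[str, str, str]],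
-- ) -> bool:
--     """Def 2.1 -- exit(e, S'):  exists(s,e,s')  in  T : s  in  S'  and  s'  not in  S'."""
--     for src, evt, tgt in ts_transitions:
--         if evt == event and src in region and tgt not in region:
--             return True
--     return False
--
-- def _in(
--     event: str,
--     region: frozenset[str],
--     ts_transitions: set[tuple[str, str, str]],
-- ) -> bool:
--     """Def 2.1 -- in(e, S'):  exists(s,e,s')  in  T : s  in  S'  and  s'  in  S'."""
--     for src, evt, tgt in ts_transitions:
--         if evt == event and src in region and tgt in region:
--             return True
--     return False
--
-- def _out(
--     event: str,
--     region: frozenset[str],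
--     ts_transitions: set[tuple[str, str, str]],
-- ) -> bool:
--     """Def 2.1 -- out(e, S'):  exists(s,e,s')  in  T : s  not in  S'  and  s'  not in  S'."""
--     for src, evt, tgt in ts_transitions:
--         if evt == event and src not in region and tgt not in region:
--             return True
--     return False
--
-- def _find_violating_event(
--     candidate: frozenset[str],
--     events: set[str],
--     ts_transitions: set[tuple[str, str, str]],
-- ) -> Optional[tuple[str, int]]:
--     """Lemma 4.1 -- Find an event that violates the region conditions.
--
--     Returns (event, violation_type) or None if *candidate* is a region.
--
--     Violation types (Lemma 4.1 + Def 2.2):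
--       1) in(e,r)  and  [enter(e,r)  or  exit(e,r)]
--       2) enter(e,r)  and  exit(e,r)
--       3) out(e,r)  and  enter(e,r)
--       4) out(e,r)  and  exit(e,r)
--       5) in(e,r)  and  out(e,r)  (non-uniform, Def 2.2)
--     """
--     for e in events:
--         en = _enter(e, candidate, ts_transitions)
--         ex = _exit(e, candidate, ts_transitions)
--         i = _in(e, candidate, ts_transitions)
--         o = _out(e, candidate, ts_transitions)
--
--         # Type 1: internal + crossing
--         if i and (en or ex):
--             return (e, 1)
--         # Type 2: both enter and exit
--         if en and ex:
--             return (e, 2)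
--         # Type 3: external + enter
--         if o and en:
--             return (e, 3)
--         # Type 4: external + exit
--         if o and ex:
--             return (e, 4)
--         # Type 5: in + out (non-uniform, Def 2.2)
--         if i and o:
--             return (e, 5)
--     return None
-- ===== SOURCE B (Python) =====
-- from typing import Optional
--
-- def _find_violating_event(
--     candidate: frozenset[str],
--     events: set[str],
--     ts_transitions: set[tuple[str, str, str]],
-- ) -> Optional[tuple[str, int]]:
--     # One pass over the transitions: bucket per-event (enter, exit, in, out)
--     # flags in a dict, then check each event against its own flags.
--     flags = {}
--     for src, evt, tgt in ts_transitions: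
--         en, ex, i, o = flags.get(evt, (False, False, False, False))
--         if src in candidate:
--             if tgt in candidate:
--                 i = True
--             else:
--                 ex = True
--         else:
--             if tgt in candidate:
--                 en = True
--             else:
--                 o = True
--         flags[evt] = (en, ex, i, o)
--     for e in events:
--         en, ex, i, o = flags.get(e, (False, False, False, False))
--         if i and (en or ex):
--             return (e, 1)
--         if en and ex:
--             return (e, 2)
--         if o and en:
--             return (e, 3)
--         if o and ex:
--             return (e, 4)
--         if i and o:
--             return (e, 5)
--     return None
-- ===== Notes on version B (the rewrite author's own statement) =====
-- stated objective: faster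
-- what changed: Instead of rescanning all transitions four times per event, B makes one pass over the transitions to accumulate per-event (enter, exit, in, out) flags in a dict, then checks each event against its own flags.
import Mathlib
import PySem

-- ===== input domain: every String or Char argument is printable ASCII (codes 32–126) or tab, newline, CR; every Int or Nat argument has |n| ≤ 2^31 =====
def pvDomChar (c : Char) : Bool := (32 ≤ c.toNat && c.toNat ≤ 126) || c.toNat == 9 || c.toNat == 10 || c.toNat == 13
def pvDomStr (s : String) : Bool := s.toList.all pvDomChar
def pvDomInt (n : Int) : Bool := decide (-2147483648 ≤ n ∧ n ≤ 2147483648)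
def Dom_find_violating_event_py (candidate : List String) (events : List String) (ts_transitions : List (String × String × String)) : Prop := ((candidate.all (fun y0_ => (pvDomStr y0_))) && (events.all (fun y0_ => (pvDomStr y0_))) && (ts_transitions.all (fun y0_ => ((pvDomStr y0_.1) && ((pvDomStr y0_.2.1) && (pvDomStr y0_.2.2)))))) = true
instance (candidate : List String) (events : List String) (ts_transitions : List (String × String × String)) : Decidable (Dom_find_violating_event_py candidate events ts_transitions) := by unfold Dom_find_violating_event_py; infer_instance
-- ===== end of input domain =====

-- B replaces A's four full scans of the transitions per event by a single pass that
-- buckets (enter, exit, in, out) flags per event in a dict; return value only, no mutation.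

-- ===== PORT A =====
-- _enter: first-match scan with early return
def fveEnter (e : String) (cand : List String) : List (String × String × String) → Bool
  | [] => false
  | (s, ev, t) :: rest =>
    if ev == e && !cand.contains s && cand.contains t then true else fveEnter e cand rest

def fveExit (e : String) (cand : List String) : List (String × String × String) → Bool
  | [] => false
  | (s, ev, t) :: rest =>
    if ev == e && cand.contains s && !cand.contains t then true else fveExit e cand rest

def fveIn (e : String) (cand : List String) : List (String × String × String) → Bool
  | [] => false
  | (s, ev, t) :: rest =>
    if ev == e && cand.contains s && cand.contains t then true else fveIn e cand rest

def fveOut (e : String) (cand : List String) : List (String × String × String) → Bool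
  | [] => false
  | (s, ev, t) :: rest =>
    if ev == e && !cand.contains s && !cand.contains t then true else fveOut e cand rest

def fveLoopA (cand : List String) (ts : List (String × String × String)) :
    List String → Option (String × Int)
  | [] => none
  | e :: rest =>
    let en := fveEnter e cand ts
    let ex := fveExit e cand ts
    let i := fveIn e cand ts
    let o := fveOut e cand ts
    if i && (en || ex) then some (e, 1)
    else if en && ex then some (e, 2)
    else if o && en then some (e, 3)
    else if o && ex then some (e, 4)
    else if i && o then some (e, 5)
    else fveLoopA cand ts rest

def find_violating_event_py (candidate : List String) (events : List String) (ts_transitions : List (String × String × String)) : Option (String × Int) :=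
  fveLoopA candidate ts_transitions events

-- ===== PORT B =====
abbrev FveFlags := Bool × Bool × Bool × Bool

-- body of B's first loop: update one event's (en, ex, i, o) flags with one transition
def fveUpd (cand : List String) (s t : String) (f : FveFlags) : FveFlags :=
  if cand.contains s then
    if cand.contains t then (f.1, f.2.1, true, f.2.2.2)
    else (f.1, true, f.2.2.1, f.2.2.2)
  else
    if cand.contains t then (true, f.2.1, f.2.2.1, f.2.2.2)
    else (f.1, f.2.1, f.2.2.1, true)

def fveBuild (cand : List String) (ts : List (String × String × String)) :
    PySem.Dict String FveFlags :=
  ts.foldl (fun d p => d.modify p.2.1 (false, false, false, false) (fveUpd cand p.1 p.2.2))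
    PySem.Dict.empty

def fveCheck (f : FveFlags) : Option Int :=
  let (en, ex, i, o) := f
  if i && (en || ex) then some 1
  else if en && ex then some 2
  else if o && en then some 3
  else if o && ex then some 4
  else if i && o then some 5
  else none

def fveLoopB (flags : PySem.Dict String FveFlags) : List String → Option (String × Int)
  | [] => none
  | e :: rest =>
    match fveCheck (flags.getD e (false, false, false, false)) with
    | some t => some (e, t)
    | none => fveLoopB flags rest

def find_violating_event_py_alt (candidate : List String) (events : List String) (ts_transitions : List (String × String × String)) : Option (String × Int) :=
  fveLoopB (fveBuild candidate ts_transitions) events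

-- ===== PRECONDITION & SPEC =====
def Spec_find_violating_event_py (candidate : List String) (events : List String) (ts_transitions : List (String × String × String)) (out : Option (String × Int)) : Prop := out = find_violating_event_py_alt candidate events ts_transitions
instance (candidate : List String) (events : List String) (ts_transitions : List (String × String × String)) (out : Option (String × Int)) : Decidable (Spec_find_violating_event_py candidate events ts_transitions out) := by unfold Spec_find_violating_event_py; infer_instance

-- ===== CLAIM (what is proved, stated in full; the proofs are below) =====
def Claim_equal_find_violating_event_py : Prop := ∀ (candidate : List String) (events : List String) (ts_transitions : List (String × String × String)), Dom_find_violating_event_py candidate events ts_transitions → Spec_find_violating_event_py candidate events ts_transitions (find_violating_event_py candidate events ts_transitions)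

-- ===== LEMMAS AND PROOFS =====

-- componentwise OR of two flag quadruples
def fveOr (a b : FveFlags) : FveFlags :=
  (a.1 || b.1, a.2.1 || b.2.1, a.2.2.1 || b.2.2.1, a.2.2.2 || b.2.2.2)

-- A's four scans, as one quadruple
def fveScan (e : String) (cand : List String) (ts : List (String × String × String)) : FveFlags :=
  (fveEnter e cand ts, fveExit e cand ts, fveIn e cand ts, fveOut e cand ts)

-- loop invariant of B's first pass: the dict entry of e accumulates exactly A's four scans
lemma fveBuild_invariant (cand : List String) (e : String)
    (ts : List (String × String × String)) (d : PySem.Dict String FveFlags) :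
    (ts.foldl (fun d p => d.modify p.2.1 (false, false, false, false) (fveUpd cand p.1 p.2.2)) d).getD
        e (false, false, false, false) =
      fveOr (d.getD e (false, false, false, false)) (fveScan e cand ts) := by
  induction ts generalizing d with
  | nil =>
    simp [fveScan, fveOr, fveEnter, fveExit, fveIn, fveOut]
  | cons p rest ih =>
    obtain ⟨s, ev, t⟩ := p
    rw [List.foldl_cons, ih, PySem.Dict.getD_modify]
    by_cases hev : e = ev
    · subst hev
      by_cases hs : s ∈ cand <;> by_cases ht : t ∈ cand <;>
        simp [fveScan, fveEnter, fveExit, fveIn, fveOut, fveUpd, fveOr, hs, ht, Bool.or_comm]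
    · have hne : (ev == e) = false := by simpa using Ne.symm hev
      simp [if_neg hev, fveScan, fveEnter, fveExit, fveIn, fveOut, hne]

lemma fveBuild_getD (cand : List String) (e : String) (ts : List (String × String × String)) :
    (fveBuild cand ts).getD e (false, false, false, false) = fveScan e cand ts := by
  rw [fveBuild, fveBuild_invariant]
  rcases fveScan e cand ts with ⟨a1, a2, a3, a4⟩
  simp [fveOr, PySem.Dict.getD_empty]

lemma fveLoop_eq (cand : List String) (ts : List (String × String × String)) :
    ∀ evs : List String, fveLoopA cand ts evs = fveLoopB (fveBuild cand ts) evs := by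
  intro evs
  induction evs with
  | nil => rfl
  | cons e rest ih =>
    rw [fveLoopA, fveLoopB, fveBuild_getD]
    rcases h : fveScan e cand ts with ⟨en, ex, i, o⟩
    have hen : fveEnter e cand ts = en := by simpa [fveScan] using congrArg (·.1) h
    have hex : fveExit e cand ts = ex := by simpa [fveScan] using congrArg (·.2.1) h
    have hi : fveIn e cand ts = i := by simpa [fveScan] using congrArg (·.2.2.1) h
    have ho : fveOut e cand ts = o := by simpa [fveScan] using congrArg (·.2.2.2) h
    simp only [hen, hex, hi, ho, fveCheck]
    cases en <;> cases ex <;> cases i <;> cases o <;> simp [ih]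

-- ===== VERDICT (by name: the statement is the Claim_ definition above) =====
theorem find_violating_event_py_spec : Claim_equal_find_violating_event_py := by
  intro candidate events ts_transitions _
  unfold Spec_find_violating_event_py find_violating_event_py find_violating_event_py_alt
  exact fveLoop_eq candidate ts_transitions events
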